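-- pv_equiv track=rewrite | github.com/claha/advent-of-code | 2023/12/solve.py | cleanup_record_middle
-- ===== SOURCE A (Python) =====
-- OPERATIONAL = "."
--
-- def cleanup_record_middle(record):
--     """Cleanup record middle."""
--     for i in range(
--         len(record) - 1,
--         0,
--         -1,
--     ):
--         if record[i] == OPERATIONAL and record[i - 1] == OPERATIONAL:
--             del record[i]
--     return record
-- ===== SOURCE B (Python) =====
-- def cleanup_record_middle(record):
--     """Cleanup record middle."""
--     out = []
--     for x in record:
--         if x == "." and out and out[-1] == ".":
--             continue
--         out.append(x)
--     record[:] = out  # same in-place mutation as A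
--     return record
-- ===== Notes on version B (the rewrite author's own statement) =====
-- stated objective: alternative
-- what changed: Replaces the backward index loop with in-place deletions by a single forward pass that builds the result, skipping a dot whose last kept element is a dot.
import Mathlib
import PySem

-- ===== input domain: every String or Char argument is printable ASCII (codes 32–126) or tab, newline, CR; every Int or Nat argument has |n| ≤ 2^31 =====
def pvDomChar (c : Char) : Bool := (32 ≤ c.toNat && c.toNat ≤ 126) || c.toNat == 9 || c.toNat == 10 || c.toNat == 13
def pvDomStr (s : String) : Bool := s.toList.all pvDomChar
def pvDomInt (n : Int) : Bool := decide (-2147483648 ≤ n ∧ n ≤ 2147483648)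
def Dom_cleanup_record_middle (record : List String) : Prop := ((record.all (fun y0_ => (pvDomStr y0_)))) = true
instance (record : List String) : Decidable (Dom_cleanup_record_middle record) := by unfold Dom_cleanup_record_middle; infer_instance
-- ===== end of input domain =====

-- B replaces A's backward index loop with in-place deletions by a single forward pass that
-- builds the result, skipping a dot whose last kept element is a dot; return values agree
-- everywhere (A's in-place mutation of `record` is reproduced by B via `record[:] = out`).

-- ===== PORT A =====
-- the for-loop `for i in range(len(record)-1, 0, -1)` as the obvious structural recursion on i;
-- record[i] / record[i-1] are always nonnegative in-range indices here (i runs from len-1 down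
-- to 1 and deletions only ever happened at indices > i), so plain positional getD is exact.
def cleanup_record_middle_loop (xs : List String) (i : Nat) : List String :=
  match i with
  | 0 => xs
  | Nat.succ k =>
    cleanup_record_middle_loop
      (if xs.getD (k+1) "" = "." ∧ xs.getD k "" = "." then xs.eraseIdx (k+1) else xs)
      k

def cleanup_record_middle (record : List String) : List String :=
  cleanup_record_middle_loop record (record.length - 1)

-- ===== PORT B =====
def cleanup_record_middle_alt (record : List String) : List String :=
  record.foldl
    (fun out x => if x = "." ∧ out ≠ [] ∧ out.getLast? = some "." then out else out ++ [x])
    []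

-- ===== PRECONDITION & SPEC =====
def Spec_cleanup_record_middle (record : List String) (out : List String) : Prop := out = cleanup_record_middle_alt record
instance (record : List String) (out : List String) : Decidable (Spec_cleanup_record_middle record out) := by unfold Spec_cleanup_record_middle; infer_instance

-- ===== CLAIM (what is proved, stated in full; the proofs are below) =====
def Claim_equal_cleanup_record_middle : Prop := ∀ (record : List String), Dom_cleanup_record_middle record → Spec_cleanup_record_middle record (cleanup_record_middle record)

-- ===== LEMMAS AND PROOFS =====

-- left-to-right collapse carrying the previously kept element
def pvCol : Option String → List String → List String
  | _, [] => []
  | p, x :: t => if x = "." ∧ p = some "." then pvCol p t else x :: pvCol (some x) t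

theorem pvFold_eq_col (xs : List String) : ∀ (out : List String),
    xs.foldl
      (fun out x => if x = "." ∧ out ≠ [] ∧ out.getLast? = some "." then out else out ++ [x])
      out = out ++ pvCol out.getLast? xs := by
  induction xs with
  | nil => intro out; simp [pvCol]
  | cons x t ih =>
    intro out
    by_cases h : x = "." ∧ out.getLast? = some "."
    · have hne : out ≠ [] := by
        intro he; rw [he] at h; simp at h
      rw [List.foldl_cons, if_pos ⟨h.1, hne, h.2⟩, ih out, h.2]
      congr 1
      simp [pvCol, h.1]
    · have hcond : ¬ (x = "." ∧ out ≠ [] ∧ out.getLast? = some ".") := by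
        intro ⟨h1, _, h3⟩; exact h ⟨h1, h3⟩
      rw [List.foldl_cons, if_neg hcond, ih (out ++ [x]), List.getLast?_concat]
      simp only [pvCol]
      rw [if_neg h]
      simp

theorem pvAlt_eq_col (record : List String) :
    cleanup_record_middle_alt record = pvCol none record := by
  have := pvFold_eq_col record []
  simpa [cleanup_record_middle_alt] using this

-- processing index i = 1 of x :: r, written directly
def pvStep1 (x : String) (r : List String) : List String :=
  if r.getD 0 "" = "." ∧ x = "." then x :: r.tail else x :: r

theorem pvLoop_shift (x : String) : ∀ (k : Nat) (ys : List String),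
    cleanup_record_middle_loop (x :: ys) (k + 1)
      = pvStep1 x (cleanup_record_middle_loop ys k) := by
  intro k
  induction k with
  | zero =>
    intro ys
    cases ys with
    | nil =>
      simp [cleanup_record_middle_loop, pvStep1, List.getD]
    | cons y t =>
      show cleanup_record_middle_loop
          (if (x :: y :: t).getD 1 "" = "." ∧ (x :: y :: t).getD 0 "" = "."
            then (x :: y :: t).eraseIdx 1 else x :: y :: t) 0 = pvStep1 x (y :: t)
      simp only [List.getD_cons_succ, List.getD_cons_zero, pvStep1]
      by_cases hc : (y :: t).getD 0 "" = "." ∧ x = "." <;>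
        simp_all [cleanup_record_middle_loop, List.eraseIdx, And.comm]
  | succ k ih =>
    intro ys
    show cleanup_record_middle_loop
        (if (x :: ys).getD (k+1+1) "" = "." ∧ (x :: ys).getD (k+1) "" = "."
          then (x :: ys).eraseIdx (k+1+1) else x :: ys) (k+1) = _
    simp only [List.getD_cons_succ]
    have he : (x :: ys).eraseIdx (k+1+1) = x :: ys.eraseIdx (k+1) := rfl
    rw [he, ← apply_ite (fun l => x :: l), ih]
    rfl

theorem pvLoop_eq_col : ∀ (xs : List String),
    cleanup_record_middle_loop xs (xs.length - 1) = pvCol none xs := by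
  intro xs
  induction xs with
  | nil => simp [cleanup_record_middle_loop, pvCol]
  | cons x ys ih =>
    cases ys with
    | nil => simp [cleanup_record_middle_loop, pvCol]
    | cons y t =>
      have hlen : (x :: y :: t).length - 1 = ((y :: t).length - 1) + 1 := by
        simp
      rw [hlen, pvLoop_shift, ih]
      show pvStep1 x (pvCol none (y :: t)) = pvCol none (x :: y :: t)
      simp only [pvCol, pvStep1]
      by_cases h : x = "." ∧ y = "."
      · simp [h.1, h.2]
      · by_cases hx : x = "."
        · have hy : ¬ y = "." := fun hy => h ⟨hx, hy⟩
          simp [hx, hy]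
        · simp [hx]

-- ===== VERDICT (by name: the statement is the Claim_ definition above) =====
theorem cleanup_record_middle_spec : Claim_equal_cleanup_record_middle := by
  intro record _
  unfold Spec_cleanup_record_middle cleanup_record_middle
  rw [pvAlt_eq_col, pvLoop_eq_col]
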